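-- pv_equiv track=rewrite | github.com/Pablo751/om-support-bot | src/models/messages.py | is_manual_mode
-- ===== SOURCE A (Python) =====
-- def is_manual_mode(historical_messages):
--     # if the two messages before a customer message are from us, it means someone started interacting with the customer manually, therefore the bot shouldn't reply
--     for i in range(len(historical_messages) - 2):
--         if (
--             historical_messages[i].get('type') == 'out' and
--             historical_messages[i + 1].get('type') == 'out' and
--             historical_messages[i + 2].get('type') == 'in'
--         ):
--             return True
--     return False
-- ===== SOURCE B (Python) =====
-- def is_manual_mode(historical_messages):
--     s = ''.join(
--         'O' if m.get('type') == 'out' else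
--         'I' if m.get('type') == 'in' else '.'
--         for m in historical_messages
--     )
--     return 'OOI' in s
-- ===== Notes on version B (the rewrite author's own statement) =====
-- stated objective: idiomatic
-- what changed: Replaces the index-based 3-window scan with building a one-char-per-message type encoding ('O'/'I'/'.') and a single substring test 'OOI' in s.
import Mathlib
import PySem

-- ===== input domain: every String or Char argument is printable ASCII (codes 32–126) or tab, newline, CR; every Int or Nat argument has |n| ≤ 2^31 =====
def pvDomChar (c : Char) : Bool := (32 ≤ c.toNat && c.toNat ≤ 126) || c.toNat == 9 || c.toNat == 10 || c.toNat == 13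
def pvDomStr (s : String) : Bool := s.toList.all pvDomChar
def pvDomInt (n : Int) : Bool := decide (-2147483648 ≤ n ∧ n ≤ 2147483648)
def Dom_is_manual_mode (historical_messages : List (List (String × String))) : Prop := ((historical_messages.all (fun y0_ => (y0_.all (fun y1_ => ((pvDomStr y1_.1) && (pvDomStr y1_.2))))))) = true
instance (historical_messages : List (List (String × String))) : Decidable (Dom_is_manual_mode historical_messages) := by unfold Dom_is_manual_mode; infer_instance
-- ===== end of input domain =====

-- B replaces A's index-based 3-window scan by encoding each message's type as one char ('O'/'I'/'.') and testing 'OOI' in the encoding (idiomatic; same cost).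


-- ===== PORT A =====
-- loop 'for i in range(len(hm) - 2): if hm[i].get('type') == 'out' and … : return True' as .any over pyRange;
-- hm[i].get('type') is '(pyGet? hm i).bind (List.lookup "type")' (the index is always in range inside the loop).
def is_manual_mode (historical_messages : List (List (String × String))) : Bool :=
  (PySem.List.pyRange 0 ((historical_messages.length : Int) - 2)).any (fun i =>
    ((PySem.List.pyGet? historical_messages i).bind (List.lookup "type") == some "out") &&
    ((PySem.List.pyGet? historical_messages (i + 1)).bind (List.lookup "type") == some "out") &&
    ((PySem.List.pyGet? historical_messages (i + 2)).bind (List.lookup "type") == some "in"))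

-- ===== PORT B =====
-- per-message character of Source B's conditional expression: 'O' for type 'out', 'I' for 'in', '.' otherwise
def pvEnc (m : List (String × String)) : Char :=
  if List.lookup "type" m == some "out" then 'O'
  else if List.lookup "type" m == some "in" then 'I'
  else '.'

-- ''.join(…) as the encoded char list; `'OOI' in s` as PySem.Chars.isIn
def is_manual_mode_alt (historical_messages : List (List (String × String))) : Bool :=
  PySem.Chars.isIn ['O', 'O', 'I'] (historical_messages.map pvEnc)

-- ===== PRECONDITION & SPEC =====
def Spec_is_manual_mode (historical_messages : List (List (String × String))) (out : Bool) : Prop := out = is_manual_mode_alt historical_messages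
instance (historical_messages : List (List (String × String))) (out : Bool) : Decidable (Spec_is_manual_mode historical_messages out) := by unfold Spec_is_manual_mode; infer_instance

-- ===== CLAIM (what is proved, stated in full; the proofs are below) =====
def Claim_equal_is_manual_mode : Prop := ∀ (historical_messages : List (List (String × String))), Dom_is_manual_mode historical_messages → Spec_is_manual_mode historical_messages (is_manual_mode historical_messages)

-- ===== LEMMAS AND PROOFS =====

-- sliding 3-window scan: the common reference shape both ports are reduced to
def pvScan3 : List Char → Bool
  | a :: b :: c :: r => (a == 'O' && b == 'O' && c == 'I') || pvScan3 (b :: c :: r)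
  | _ => false

theorem pv_isIn_cons (pat : List Char) (c : Char) (l : List Char) :
    PySem.Chars.isIn pat (c :: l) = (pat.isPrefixOf (c :: l) || PySem.Chars.isIn pat l) := by
  rw [Bool.eq_iff_iff]
  simp only [Bool.or_eq_true, PySem.Chars.isIn_iff_infix, List.isPrefixOf_iff_prefix]
  exact List.infix_cons_iff

theorem pv_isIn_nil : PySem.Chars.isIn ['O', 'O', 'I'] [] = false := by decide

theorem pvScan3_eq_isIn : ∀ l : List Char, pvScan3 l = PySem.Chars.isIn ['O', 'O', 'I'] l
  | [] => by rw [pv_isIn_nil]; rfl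
  | [a] => by rw [pv_isIn_cons, pv_isIn_nil]; simp [pvScan3, List.isPrefixOf]
  | [a, b] => by
      rw [pv_isIn_cons, pv_isIn_cons, pv_isIn_nil]
      simp [pvScan3, List.isPrefixOf]
  | a :: b :: c :: r => by
      rw [pv_isIn_cons]
      have ih := pvScan3_eq_isIn (b :: c :: r)
      simp only [pvScan3, ih, List.isPrefixOf, Bool.and_assoc, Bool.and_true, Bool.beq_comm]

theorem pv_pyGet?_cons_succ {α : Type} (x : α) (t : List α) (i : Int) (h : 0 ≤ i) :
    PySem.List.pyGet? (x :: t) (i + 1) = PySem.List.pyGet? t i := by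
  simp only [PySem.List.pyGet?, PySem.List.pyIdx?, List.length_cons]
  split_ifs with h1 h2 h3 h4 <;> try omega
  · have : (i + 1).toNat = i.toNat + 1 := by omega
    simp [this]
  · rfl

theorem pv_pyGet?_zero {α : Type} (x : α) (t : List α) :
    PySem.List.pyGet? (x :: t) 0 = some x := by
  simp [PySem.List.pyGet?, PySem.List.pyIdx?]

-- the window predicate of port A's loop body (definitionally its lambda)
def pvW (hm : List (List (String × String))) (i : Int) : Bool :=
  ((PySem.List.pyGet? hm i).bind (List.lookup "type") == some "out") &&
  ((PySem.List.pyGet? hm (i + 1)).bind (List.lookup "type") == some "out") &&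
  ((PySem.List.pyGet? hm (i + 2)).bind (List.lookup "type") == some "in")

theorem pvW_cons_succ (x : List (String × String)) (t : List (List (String × String))) (i : Int)
    (h : 0 ≤ i) : pvW (x :: t) (i + 1) = pvW t i := by
  unfold pvW
  rw [show i + 1 + 2 = (i + 2) + 1 by ring, pv_pyGet?_cons_succ x t (i + 2) (by omega),
    show i + 1 + 1 = (i + 1) + 1 by ring, pv_pyGet?_cons_succ x t (i + 1) (by omega),
    pv_pyGet?_cons_succ x t i h]

theorem pv_any_shift (x : List (String × String)) (t : List (List (String × String))) :
    ∀ (k : Nat) (a : Int), 0 ≤ a →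
      ((PySem.List.pyRange (a + 1) (a + 1 + k)).any (pvW (x :: t))) =
      ((PySem.List.pyRange a (a + k)).any (pvW t))
  | 0, a, _ => by
      rw [PySem.List.pyRange_one_eq_nil (by push_cast; omega),
        PySem.List.pyRange_one_eq_nil (by push_cast; omega)]
      rfl
  | k + 1, a, ha => by
      rw [PySem.List.pyRange_one_cons (show a + 1 < a + 1 + ((k + 1 : Nat) : Int) by push_cast; omega),
        PySem.List.pyRange_one_cons (show a < a + ((k + 1 : Nat) : Int) by push_cast; omega)]
      simp only [List.any_cons]
      rw [pvW_cons_succ x t a ha,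
        show a + 1 + ((k + 1 : Nat) : Int) = (a + 1) + 1 + (k : Int) by push_cast; ring,
        show a + ((k + 1 : Nat) : Int) = (a + 1) + (k : Int) by push_cast; ring,
        pv_any_shift x t k (a + 1) (by omega)]

-- first-window agreement: port A's test at index 0 is B's encoded-chars test
theorem pv_lookup_out (m : List (String × String)) :
    (List.lookup "type" m == some "out") = (pvEnc m == 'O') := by
  unfold pvEnc
  by_cases h : List.lookup "type" m == some "out"
  · simp [h]
  · simp only [Bool.not_eq_true] at h
    rw [h]
    by_cases h2 : List.lookup "type" m == some "in" <;> simp [h2]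

theorem pv_lookup_in (m : List (String × String)) :
    (List.lookup "type" m == some "in") = (pvEnc m == 'I') := by
  unfold pvEnc
  by_cases h : List.lookup "type" m == some "out"
  · have : List.lookup "type" m = some "out" := eq_of_beq h
    rw [this]
    simp
  · simp only [Bool.not_eq_true] at h
    rw [h]
    by_cases h2 : List.lookup "type" m == some "in" <;> simp [h2]

theorem pvW_zero (x y z : List (String × String)) (r : List (List (String × String))) :
    pvW (x :: y :: z :: r) 0 = ((pvEnc x == 'O') && (pvEnc y == 'O') && (pvEnc z == 'I')) := by
  unfold pvW
  rw [pv_pyGet?_zero,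
    show (0 : Int) + 1 = 0 + 1 by ring, pv_pyGet?_cons_succ _ _ 0 le_rfl, pv_pyGet?_zero,
    show (0 : Int) + 2 = (0 + 1) + 1 by ring, pv_pyGet?_cons_succ _ _ (0 + 1) (by omega),
    pv_pyGet?_cons_succ _ _ 0 le_rfl, pv_pyGet?_zero]
  simp only [Option.bind_some]
  rw [pv_lookup_out x, pv_lookup_out y, pv_lookup_in z]

theorem pv_A_eq_scan : ∀ hm : List (List (String × String)),
    is_manual_mode hm = pvScan3 (hm.map pvEnc)
  | [] => by rfl
  | [x] => by rfl
  | [x, y] => by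
      unfold is_manual_mode
      rw [PySem.List.pyRange_one_eq_nil (by simp)]
      rfl
  | x :: y :: z :: r => by
      have ih := pv_A_eq_scan (y :: z :: r)
      have hA : ∀ hm : List (List (String × String)), is_manual_mode hm
          = (PySem.List.pyRange 0 ((hm.length : Int) - 2)).any (pvW hm) := fun _ => rfl
      rw [hA] at ih ⊢
      rw [show ((x :: y :: z :: r).length : Int) - 2 = 0 + 1 + (r.length : Int) by
            simp [List.length_cons]; ring,
        show (0 : Int) + 1 + (r.length : Int) = 0 + 1 + ((r.length : Nat) : Int) by push_cast; ring,
        PySem.List.pyRange_one_cons (show (0 : Int) < 0 + 1 + ((r.length : Nat) : Int) by push_cast; omega)]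
      simp only [List.any_cons]
      rw [pv_any_shift x (y :: z :: r) r.length 0 le_rfl,
        show (0 : Int) + ((r.length : Nat) : Int) = ((y :: z :: r).length : Int) - 2 by
          simp [List.length_cons]; ring,
        ih, pvW_zero]
      simp only [List.map_cons, pvScan3, Bool.and_assoc]

-- ===== VERDICT (by name: the statement is the Claim_ definition above) =====
theorem is_manual_mode_spec : Claim_equal_is_manual_mode := by
  intro hm _
  unfold Spec_is_manual_mode
  rw [pv_A_eq_scan hm, pvScan3_eq_isIn, is_manual_mode_alt]
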